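-- pv_equiv track=rewrite | github.com/hazieqq/Algorithm-Analysis-and-Design-Project | Problem 2/Pos Laju/Article 1/calculate.py | calcPos
-- ===== SOURCE A (Python) =====
-- def calcPos(text1, text2):
--   index = 0
--   sum = 0
--
--   for i in range(len(text2)):
--       for j in range(len(text1)):
--           if text1[j] == text2[i]:
--               index += 1
--
--       sum += index
--       index = 0
--
--   return sum
-- ===== SOURCE B (Python) =====
-- def calcPos(text1, text2):
--     count1 = {}
--     for c in text1:
--         count1[c] = count1.get(c, 0) + 1
--     count2 = {}
--     for c in text2:
--         count2[c] = count2.get(c, 0) + 1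
--     return sum(n * count1.get(c, 0) for c, n in count2.items())
-- ===== Notes on version B (the rewrite author's own statement) =====
-- stated objective: faster
-- what changed: Replaced the nested scan (for each char of text2, rescan all of text1) by one frequency count of each string and a single sum of count2[c]*count1[c] over text2's distinct characters.
import Mathlib
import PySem

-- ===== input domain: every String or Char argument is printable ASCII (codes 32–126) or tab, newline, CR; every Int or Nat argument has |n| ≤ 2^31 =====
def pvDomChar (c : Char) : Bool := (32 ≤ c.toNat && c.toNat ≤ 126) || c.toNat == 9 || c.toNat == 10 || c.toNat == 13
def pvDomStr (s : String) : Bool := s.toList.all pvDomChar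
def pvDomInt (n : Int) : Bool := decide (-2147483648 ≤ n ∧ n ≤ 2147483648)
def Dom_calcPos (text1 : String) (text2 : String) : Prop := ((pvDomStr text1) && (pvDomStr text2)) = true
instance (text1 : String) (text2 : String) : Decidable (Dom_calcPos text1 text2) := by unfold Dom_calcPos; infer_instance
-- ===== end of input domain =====

-- B replaces A's nested rescans with two frequency dictionaries and one product-sum: asymptotically faster (O(n+m) vs O(n*m)).


-- ===== PORT A =====
-- literal port of A: for i over range(len(text2)), inner loop over range(len(text1)) counting equal characters, add to sum
def calcPos (text1 : String) (text2 : String) : Int :=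
  let l1 := text1.toList
  let l2 := text2.toList
  (PySem.List.pyRange 0 (l2.length : Int) 1).foldl
    (fun sum i =>
      sum +
        (PySem.List.pyRange 0 (l1.length : Int) 1).foldl
          (fun index j =>
            if PySem.List.pyGetD l1 j ' ' == PySem.List.pyGetD l2 i ' ' then index + 1 else index)
          0)
    0

-- ===== PORT B =====
-- literal port of B: build both frequency dicts, then sum n * count1.get(c, 0) over count2.items()
def calcPos_alt (text1 : String) (text2 : String) : Int :=
  let count1 : PySem.Dict Char Int :=
    text1.toList.foldl (fun d c => d.insert c (d.getD c 0 + 1)) PySem.Dict.empty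
  let count2 : PySem.Dict Char Int :=
    text2.toList.foldl (fun d c => d.insert c (d.getD c 0 + 1)) PySem.Dict.empty
  (count2.items.map (fun p => p.2 * count1.getD p.1 0)).sum

-- ===== PRECONDITION & SPEC =====
def Spec_calcPos (text1 : String) (text2 : String) (out : Int) : Prop := out = calcPos_alt text1 text2
instance (text1 : String) (text2 : String) (out : Int) : Decidable (Spec_calcPos text1 text2 out) := by unfold Spec_calcPos; infer_instance

-- ===== CLAIM (what is proved, stated in full; the proofs are below) =====
def Claim_equal_calcPos : Prop := ∀ (text1 : String) (text2 : String), Dom_calcPos text1 text2 → Spec_calcPos text1 text2 (calcPos text1 text2)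

-- ===== LEMMAS AND PROOFS =====

-- the inner counting fold computes the count (as Int)
theorem foldl_count_eq (l : List Char) (c : Char) (init : Int) :
    l.foldl (fun index x => if x == c then index + 1 else index) init = init + (l.count c : Int) := by
  induction l generalizing init with
  | nil => simp
  | cons x l ih =>
    simp only [List.foldl_cons, List.count_cons, ih]
    by_cases h : x = c
    · simp [h]; ring
    · simp [h]

-- a fold adding g of each element is the sum of the mapped list
theorem foldl_add_sum (l : List Char) (g : Char → Int) (init : Int) :
    l.foldl (fun s c => s + g c) init = init + (l.map g).sum := by
  induction l generalizing init with
  | nil => simp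
  | cons x l ih => simp [List.foldl_cons, ih]; ring

-- index loop over range(len l1) with pyGetD = count of C in l1
theorem inner_eq (l1 : List Char) (C : Char) :
    (PySem.List.pyRange 0 (l1.length : Int) 1).foldl
      (fun index j => if PySem.List.pyGetD l1 j ' ' == C then index + 1 else index) 0
      = (l1.count C : Int) := by
  have h := PySem.List.foldl_pyRange_pyGetD' (xs := l1) (a := 0) (d := ' ')
      (f := fun (index : Int) x => if x == C then index + 1 else index) (init := (0:Int)) (by norm_num)
  rw [h, foldl_count_eq]
  simp

-- outer index loop over range(len l2) with pyGetD = fold over the characters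
theorem outer_eq (l2 : List Char) (g : Char → Int) :
    (PySem.List.pyRange 0 (l2.length : Int) 1).foldl
      (fun sum i => sum + g (PySem.List.pyGetD l2 i ' ')) 0
      = l2.foldl (fun s c => s + g c) 0 := by
  have h := PySem.List.foldl_pyRange_pyGetD' (xs := l2) (a := 0) (d := ' ')
      (f := fun (s : Int) x => s + g x) (init := (0:Int)) (by norm_num)
  simpa using h

-- a nodup list containing x sums the indicator to f x
theorem sum_map_indicator (S : List Char) (x : Char) (f : Char → Int)
    (hnd : S.Nodup) (hx : x ∈ S) :
    (S.map (fun k => if k = x then f k else 0)).sum = f x := by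
  induction S with
  | nil => cases hx
  | cons a S ih =>
    by_cases hax : x = a
    · subst hax
      have hxS : x ∉ S := (List.nodup_cons.mp hnd).1
      have h0 : (S.map (fun k => if k = x then f k else 0)).sum = 0 := by
        apply List.sum_eq_zero
        intro y hy
        rcases List.mem_map.mp hy with ⟨k, hk, rfl⟩
        have : k ≠ x := fun hkx => hxS (hkx ▸ hk)
        simp [this]
      simp [h0]
    · have hxS : x ∈ S := by
        rcases List.mem_cons.mp hx with h | h
        · exact absurd h hax
        · exact h
      rw [List.map_cons, List.sum_cons, if_neg (fun h => hax h.symm), zero_add,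
          ih (List.nodup_cons.mp hnd).2 hxS]

-- sum over a nodup superset of distinct chars weighted by count equals plain sum over the list
theorem sum_count_eq (S : List Char) (l : List Char) (f : Char → Int)
    (hnd : S.Nodup) (hsub : ∀ x ∈ l, x ∈ S) :
    (S.map (fun k => (l.count k : Int) * f k)).sum = (l.map f).sum := by
  induction l with
  | nil => simp
  | cons x l ih =>
    have hx : x ∈ S := hsub x (List.mem_cons_self ..)
    have hsub' : ∀ y ∈ l, y ∈ S := fun y hy => hsub y (List.mem_cons_of_mem _ hy)
    have key : ∀ k, ((x :: l).count k : Int) * f k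
        = (l.count k : Int) * f k + (if k = x then f k else 0) := by
      intro k
      rw [List.count_cons]
      by_cases h : k = x
      · simp [h]; ring
      · simp [h]
        exact Or.inl fun hh => h hh.symm
    calc (S.map (fun k => ((x :: l).count k : Int) * f k)).sum
        = (S.map (fun k => (l.count k : Int) * f k + (if k = x then f k else 0))).sum := by
          congr 1; exact List.map_congr_left (fun k _ => key k)
      _ = (S.map (fun k => (l.count k : Int) * f k)).sum
          + (S.map (fun k => if k = x then f k else 0)).sum := by
          rw [← List.sum_map_add]
      _ = (l.map f).sum + f x := by rw [ih hsub', sum_map_indicator S x f hnd hx]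
      _ = ((x :: l).map f).sum := by simp [add_comm]

-- ===== VERDICT (by name: the statement is the Claim_ definition above) =====
theorem calcPos_spec : Claim_equal_calcPos := by
  intro text1 text2 _
  unfold Spec_calcPos calcPos calcPos_alt
  simp only []
  set l1 := text1.toList
  set l2 := text2.toList
  -- A side: collapse the index loops into count / fold over the character lists
  simp only [inner_eq]
  rw [outer_eq l2 (fun c => (l1.count c : Int)), foldl_add_sum, zero_add]
  -- B side: the foldl builds are counters; items/getD of a counter
  rw [PySem.Dict.foldl_insert_getD_add_one_eq_counter,
      PySem.Dict.foldl_insert_getD_add_one_eq_counter,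
      PySem.Dict.items_counter, List.map_map]
  have : ((fun p : Char × Int => p.2 * (PySem.Dict.counter l1).getD p.1 0) ∘
      (fun k => (k, (l2.count k : Int)))) = fun k => (l2.count k : Int) * (l1.count k : Int) := by
    funext k
    simp [Function.comp, PySem.Dict.getD_counter]
  rw [this]
  exact (sum_count_eq (PySem.Set.ofList l2) l2 (fun k => (l1.count k : Int))
      (PySem.Set.nodup_ofList l2) (fun x hx => (PySem.Set.mem_ofList l2 x).mpr hx)).symm
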